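-- pv_equiv track=rewrite | github.com/Michael-Data-Science-spec/skyscrapers | skyscrapers.py | check_horizontal_visibility
-- ===== SOURCE A (Python) =====
-- def left_to_right_check(input_line: str, pivot: int):
--     """
--     Check row-wise visibility from left to right.
--     Return True if number of building from the left-most hint is visible looking to the right,
--     False otherwise.
--
--     input_line - representing board row.
--     pivot - number on the left-most hint of the input_line.
--
--     >>> left_to_right_check("412453*", 4)
--     True
--     >>> left_to_right_check("452453*", 5)
--     False
--     """
--     visible_buildings = [int(input_line[1])]
--
--     for idx in range(1, len(input_line) - 1):
--
--         if int(input_line[idx]) > visible_buildings[-1]: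
--             visible_buildings.append(int(input_line[idx]))
--
--     if len(visible_buildings) != pivot:
--         return False
--
--     return True
--
-- def check_horizontal_visibility(board: list):
--     """
--     Check row-wise visibility (left-right and vice versa)
--
--     Return True if all horizontal hints are satisfiable,
--      i.e., for line 412453* , hint is 4, and 1245 are the four buildings
--       that could be observed from the hint looking to the right.
--
--     >>> check_horizontal_visibility(['***21**', '412453*', '423145*', '*543215', '*35214*', '*41532*', '*2*1***'])
--     True
--     >>> check_horizontal_visibility(['***21**', '452453*', '423145*', '*543215', '*35214*', '*41532*', '*2*1***'])
--     False
--     >>> check_horizontal_visibility(['***21**', '452413*', '423145*', '*543215', '*35214*', '*41532*', '*2*1***'])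
--     False
--     """
--     for line in board[1: -1]:
--
--         if line[0] != '*':
--             if not left_to_right_check(line, int(line[0])):
--                 return False
--
--         if line[-1] != '*':
--             if not left_to_right_check(line[::-1], int(line[-1])):
--                 return False
--
--     return True
-- ===== SOURCE B (Python) =====
-- def check_horizontal_visibility(board: list):
--     """Alternative decomposition: per line, build the prefix maxima of the interior
--     digits as a table and count the distinct values (= number of visible buildings),
--     instead of growing the list of visible buildings in an inline scan."""
--
--     def visible(ds):
--         return len({max(ds[:i + 1]) for i in range(len(ds))})
--
--     def line_ok(line):
--         if line[0] != '*':
--             if visible([int(c) for c in line[1:-1]]) != int(line[0]):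
--                 return False
--         if line[-1] != '*':
--             if visible([int(c) for c in line[1:-1]][::-1]) != int(line[-1]):
--                 return False
--         return True
--
--     return all(line_ok(line) for line in board[1:-1])
-- ===== Notes on version B (the rewrite author's own statement) =====
-- stated objective: alternative
-- what changed: Per row, B builds the prefix-maxima table of the interior digits and counts its distinct values with a set (visible = number of distinct running maxima), and folds the outer loop into all(); A instead grows the list of visible buildings in an inline scan and compares its length.
-- outside the precondition, e.g. on check_horizontal_visibility(['*', '11', '*']): A returns True, B returns False; on check_horizontal_visibility(['*', '21*', 'a!a', '*']): A returns False, B returns False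
import Mathlib
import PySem

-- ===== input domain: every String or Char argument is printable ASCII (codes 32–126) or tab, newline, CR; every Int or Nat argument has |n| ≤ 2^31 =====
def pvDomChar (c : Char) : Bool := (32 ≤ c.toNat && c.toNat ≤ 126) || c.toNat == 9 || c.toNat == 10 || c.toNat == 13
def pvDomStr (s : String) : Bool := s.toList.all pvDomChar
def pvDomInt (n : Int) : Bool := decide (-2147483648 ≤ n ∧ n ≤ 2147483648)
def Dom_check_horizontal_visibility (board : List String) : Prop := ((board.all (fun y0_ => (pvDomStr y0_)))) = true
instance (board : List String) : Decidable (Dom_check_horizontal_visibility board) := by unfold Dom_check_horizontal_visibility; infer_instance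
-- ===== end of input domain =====

-- B replaces A's inline grow-a-list visibility scan by a prefix-maxima table whose distinct
-- values are counted with a set (objective: alternative decomposition, same cost).

-- ===== PORT A =====
-- int(line[i]) : the index then int() of the one-character string; none = IndexError/ValueError
def pvCharInt? (cs : List Char) (i : Int) : Option Int :=
  (PySem.List.pyGet? cs i).bind fun c => PySem.Int.ofChars? [c]

-- left_to_right_check, over the character list of input_line; none = the Python raises
def ltrChars (cs : List Char) (pivot : Int) : Option Bool :=
  (pvCharInt? cs 1).bind fun v0 =>
    ((PySem.List.pyRange 1 ((cs.length : Int) - 1) 1).foldl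
        (fun (acc : Option (List Int)) idx =>
          acc.bind fun vb =>
            (pvCharInt? cs idx).map fun d =>
              -- visible_buildings[-1]: vb is never empty, pyGetD is the sanctioned total form
              if d > PySem.List.pyGetD vb (-1) 0 then vb ++ [d] else vb)
        (some [v0])).map fun vb =>
      if (vb.length : Int) ≠ pivot then false else true

-- the 'for line in board[1:-1]' loop with its early returns; none = the Python raises
def pvChvLoop : List (List Char) → Option Bool
  | [] => some true
  | cs :: rest =>
    (PySem.List.pyGet? cs 0).bind fun c0 =>
    (if c0 ≠ '*' then
        (PySem.Int.ofChars? [c0]).bind fun p => ltrChars cs p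
     else some true).bind fun ok1 =>
    if ok1 then
      (PySem.List.pyGet? cs (-1)).bind fun cl =>
      (if cl ≠ '*' then
          -- line[::-1] is cs.reverse (PySem.List.slice?_none_none_neg_one)
          (PySem.Int.ofChars? [cl]).bind fun p => ltrChars cs.reverse p
       else some true).bind fun ok2 =>
      if ok2 then pvChvLoop rest else some false
    else some false

def check_horizontal_visibility (board : List String) : Bool :=
  -- none = the Python raises; exactly those boards are excluded by Pre_
  (pvChvLoop ((PySem.List.slice board (some 1) (some (-1))).map String.toList)).getD false

-- ===== PORT B =====
-- visible(ds) = len({max(ds[:i+1]) for i in range(len(ds))}); max() never sees an empty slice,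
-- so the .getD 0 default is unreachable
def pvVisible (ds : List Int) : Int :=
  ((PySem.Set.ofList ((PySem.List.pyRange 0 (ds.length : Int) 1).map
      (fun i => (PySem.List.max? (PySem.List.slice ds none (some (i + 1))) (fun x => x)).getD 0))).length : Int)

-- [int(c) for c in line[1:-1]]; none = ValueError
def pvDigits? (cs : List Char) : Option (List Int) :=
  (PySem.List.slice cs (some 1) (some (-1))).mapM fun c => PySem.Int.ofChars? [c]

-- line_ok(line); none = the Python raises
def pvLineOk? (cs : List Char) : Option Bool :=
  (PySem.List.pyGet? cs 0).bind fun c0 =>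
  (if c0 ≠ '*' then
      (pvDigits? cs).bind fun ds =>
      (PySem.Int.ofChars? [c0]).map fun p => pvVisible ds == p
   else some true).bind fun ok1 =>
  if ok1 then
    (PySem.List.pyGet? cs (-1)).bind fun cl =>
    (if cl ≠ '*' then
        (pvDigits? cs).bind fun ds =>
        (PySem.Int.ofChars? [cl]).map fun p => pvVisible ds.reverse == p
     else some true).bind fun ok2 =>
    if ok2 then some true else some false
  else some false

-- all(line_ok(line) for line in ...), short-circuiting like the generator does
def pvAltLoop : List (List Char) → Option Bool
  | [] => some true
  | cs :: rest =>
    (pvLineOk? cs).bind fun ok => if ok then pvAltLoop rest else some false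

def check_horizontal_visibility_alt (board : List String) : Bool :=
  (pvAltLoop ((PySem.List.slice board (some 1) (some (-1))).map String.toList)).getD false

-- ===== PRECONDITION & SPEC =====
-- a well-formed interior line: length ≥ 3, each hint is '*' or a digit, and when a hint is
-- present the interior characters are all digits (otherwise A raises ValueError)
def pvLineOK (cs : List Char) : Bool :=
  (decide (cs ≠ []) && (cs.headD '*' == '*') && (cs.getLastD '*' == '*')) ||
  (decide (3 ≤ cs.length) &&
   ((cs.headD '*' == '*') || ((cs.headD '*').isDigit && (cs.tail.dropLast).all Char.isDigit)) &&
   ((cs.getLastD '*' == '*') || ((cs.getLastD '*').isDigit && (cs.tail.dropLast).all Char.isDigit)))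

-- Pre_ excludes the boards on which A raises (a non-digit where int() is applied, a line of
-- length < 2) and, beyond that, narrows to boards whose interior lines ALL are hint-free or
-- have the natural board shape (length ≥ 3, digit interior when a hint is present): on a
-- degenerate length-2 line A's left check reads the right-hint character as a building, and
-- a malformed line standing after an early False is never reached by A at all — see
-- claim.json cites.
def Pre_check_horizontal_visibility (board : List String) : Prop :=
  (board.tail.dropLast).all (fun line => pvLineOK line.toList) = true

instance (board : List String) : Decidable (Pre_check_horizontal_visibility board) := by
  unfold Pre_check_horizontal_visibility; infer_instance

def pvWitness_check_horizontal_visibility : List String :=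
  ["***21**", "412453*", "423145*", "*543215", "*35214*", "*41532*", "*2*1***"]

def Spec_check_horizontal_visibility (board : List String) (out : Bool) : Prop := out = check_horizontal_visibility_alt board
instance (board : List String) (out : Bool) : Decidable (Spec_check_horizontal_visibility board out) := by unfold Spec_check_horizontal_visibility; infer_instance

-- ===== CLAIM (what is proved, stated in full; the proofs are below) =====
def Claim_equal_check_horizontal_visibility : Prop := ∀ (board : List String), Dom_check_horizontal_visibility board → Pre_check_horizontal_visibility board → Spec_check_horizontal_visibility board (check_horizontal_visibility board)

-- ===== LEMMAS AND PROOFS =====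

-- value of a digit character
def pvDigitVal (c : Char) : Int := (c.toNat : Int) - 48

-- number of new running-max records, continuing from current maximum M
def pvRecs : Int → List Int → Nat
  | _, [] => 0
  | M, x :: t => if M < x then 1 + pvRecs x t else pvRecs M t

-- prefix maxima, continuing from current maximum M
def pvPM : Int → List Int → List Int
  | _, [] => []
  | M, x :: t => max M x :: pvPM (max M x) t

-- what A's visible_buildings list counts
def pvCountA : List Int → Nat
  | [] => 0
  | d :: t => 1 + pvRecs d t

-- the body of A's loop, on the digit values
def pvStep (vb : List Int) (d : Int) : List Int :=
  if d > PySem.List.pyGetD vb (-1) 0 then vb ++ [d] else vb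

theorem pm_ge (t : List Int) : ∀ (M : Int), ∀ x ∈ pvPM M t, M ≤ x := by
  induction t with
  | nil => intro M x hx; simp [pvPM] at hx
  | cons a t ih =>
    intro M x hx
    simp only [pvPM, List.mem_cons] at hx
    rcases hx with rfl | hx
    · exact le_max_left _ _
    · exact le_trans (le_max_left _ _) (ih (max M a) x hx)

theorem discard_not_mem {s : PySem.Set Int} {x : Int} (h : x ∉ s) : PySem.Set.discard s x = s := by
  simp only [PySem.Set.discard, List.filter_eq_self, Bool.not_eq_eq_eq_not, Bool.not_true,
    beq_eq_false_iff_ne, ne_eq]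
  intro a ha e; exact h (e ▸ ha)

theorem ofList_cons_cons_self (M : Int) (l : List Int) :
    PySem.Set.ofList (M :: M :: l) = PySem.Set.ofList (M :: l) := by
  rw [PySem.Set.ofList_eq_foldl, PySem.Set.ofList_eq_foldl]
  simp only [List.foldl_cons]
  congr 1
  have h1 : PySem.Set.add ([] : PySem.Set Int) M = [M] := rfl
  rw [h1, PySem.Set.add_of_mem (by simp)]

theorem L2 (t : List Int) : ∀ M : Int, (PySem.Set.ofList (M :: pvPM M t)).length = 1 + pvRecs M t := by
  induction t with
  | nil => intro M; rfl
  | cons x t ih =>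
    intro M
    by_cases h : M < x
    · have hmax : max M x = x := max_eq_right h.le
      simp only [pvPM, hmax, pvRecs, if_pos h]
      rw [PySem.Set.ofList_cons, discard_not_mem, List.length_cons, ih x]
      · omega
      · intro hmem
        rw [PySem.Set.mem_ofList, List.mem_cons] at hmem
        rcases hmem with h' | h'
        · exact h.ne h'
        · exact absurd (pm_ge t x M h') (not_le.mpr h)
    · have hmax : max M x = M := max_eq_left (not_lt.mp h)
      simp only [pvPM, hmax, pvRecs, if_neg h]
      rw [ofList_cons_cons_self, ih M]

theorem L3 (t : List Int) : ∀ d : Int,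
    (List.range t.length).map (fun i => (t.take (i+1)).foldl max d) = pvPM d t := by
  induction t with
  | nil => intro d; rfl
  | cons x t ih =>
    intro d
    simp only [List.length_cons, List.range_succ_eq_map, List.map_cons, List.map_map]
    simp only [pvPM]
    congr 1
    rw [← ih (max d x)]
    apply List.map_congr_left
    intro i hi
    simp [List.take_succ_cons, List.foldl_cons]

theorem visible_list (d : Int) (t : List Int) :
    ((PySem.List.pyRange 0 (((d :: t).length : Int)) 1).map
      (fun i => (PySem.List.max? (PySem.List.slice (d :: t) none (some (i + 1))) (fun x => x)).getD 0))
    = d :: pvPM d t := by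
  rw [show (((d :: t).length : Int)) = ((t.length + 1 : Nat) : Int) by simp, PySem.List.pyRange_zero_nat]
  rw [List.map_map]
  have hstep : ∀ i : Nat, ((fun i => (PySem.List.max? (PySem.List.slice (d :: t) none (some (i + 1))) (fun x => x)).getD 0) ∘ (fun k : Nat => (k : Int))) i
      = (List.take i t).foldl max d := by
    intro i
    simp only [Function.comp_apply]
    rw [show ((i : Int) + 1) = ((i + 1 : Nat) : Int) by push_cast; ring]
    rw [PySem.List.slice_to_natCast, List.take_succ_cons, PySem.List.max?_id_cons]
    rfl
  rw [List.map_congr_left (fun i _ => hstep i)]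
  rw [List.range_succ_eq_map, List.map_cons, List.map_map]
  congr 1
  rw [← L3 t d]
  apply List.map_congr_left
  intro i hi
  rfl

theorem L1 (t : List Int) : ∀ (acc : List Int) (h : acc ≠ []),
    (t.foldl pvStep acc).length = acc.length + pvRecs (acc.getLast h) t := by
  induction t with
  | nil => intro acc h; rfl
  | cons x t ih =>
    intro acc h
    simp only [List.foldl_cons, pvRecs]
    rw [show pvStep acc x = if acc.getLast h < x then acc ++ [x] else acc by
      rw [pvStep, PySem.List.pyGetD_neg_one (h := h)]]
    by_cases hx : acc.getLast h < x
    · rw [if_pos hx, if_pos hx, ih (acc ++ [x]) (by simp)]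
      simp
      omega
    · rw [if_neg hx, if_neg hx, ih acc h]

theorem foldO (cs : List Char) (v : Int → Int) :
    ∀ (l : List Int) (init : List Int), (∀ i ∈ l, pvCharInt? cs i = some (v i)) →
    l.foldl (fun acc idx => acc.bind fun vb => (pvCharInt? cs idx).map fun d =>
        if d > PySem.List.pyGetD vb (-1) 0 then vb ++ [d] else vb) (some init)
    = some (l.foldl (fun vb idx => pvStep vb (v idx)) init) := by
  intro l
  induction l with
  | nil => intro init _; rfl
  | cons i l ih =>
    intro init hv
    simp only [List.foldl_cons, hv i (List.mem_cons_self ..), Option.bind_some, Option.map_some]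
    rw [ih _ (fun j hj => hv j (List.mem_cons_of_mem _ hj))]
    rfl

theorem foldl_range_getD (g : List Int → Int → List Int) :
    ∀ (ds : List Int) (init : List Int),
    (List.range ds.length).foldl (fun vb k => g vb (ds.getD k 0)) init = ds.foldl g init := by
  intro ds
  induction ds with
  | nil => intro init; rfl
  | cons x t ih =>
    intro init
    rw [List.length_cons, List.range_succ_eq_map, List.foldl_cons, List.foldl_map]
    simpa using ih (g init x)

theorem pv_ofChars_digit (c : Char) (h : c.isDigit) :
    PySem.Int.ofChars? [c] = some (pvDigitVal c) := by
  unfold pvDigitVal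
  simp [Char.isDigit, UInt32.le_iff_toNat_le] at h
  have hc : c = Char.ofNat c.toNat := by simp [Char.ofNat_toNat]
  obtain ⟨h1, h2⟩ := h
  rw [hc]
  have h1' : 48 ≤ c.toNat := h1
  have h2' : c.toNat ≤ 57 := h2
  generalize c.toNat = n at *
  interval_cases n <;> decide

theorem pv_ltr_eq (cs : List Char) (h3 : 3 ≤ cs.length)
    (hd : ∀ c ∈ cs.tail.dropLast, c.isDigit) (p : Int) :
    ltrChars cs p = some ((pvCountA ((cs.tail.dropLast).map pvDigitVal) : Int) == p) := by
  have hlen : cs.tail.dropLast.length = cs.length - 2 := by simp; omega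
  have hgetin : ∀ k, (hk : k < cs.tail.dropLast.length) →
      cs.tail.dropLast[k] = cs[k+1]'(by omega) := by
    intro k hk
    simp [List.getElem_dropLast, List.getElem_tail]
  have hdig : ∀ k, (hk : k + 1 < cs.length - 1) → (cs[k+1]'(by omega)).isDigit := by
    intro k hk
    have := hd (cs.tail.dropLast[k]'(by omega)) (List.getElem_mem _)
    rwa [hgetin k (by omega)] at this
  set v : Int → Int := fun i => pvDigitVal (cs.getD i.toNat ' ') with hv
  have hread : ∀ i : Int, 1 ≤ i → i < (cs.length : Int) - 1 → pvCharInt? cs i = some (v i) := by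
    intro i hi1 hi2
    have hlt : i.toNat < cs.length := by omega
    unfold pvCharInt?
    rw [PySem.List.pyGet?_of_nonneg cs (by omega), List.getElem?_eq_getElem hlt]
    have : cs[i.toNat] = cs[(i.toNat - 1) + 1]'(by omega) := by congr 1; omega
    rw [Option.bind_some, this, pv_ofChars_digit _ (hdig (i.toNat - 1) (by omega))]
    rw [hv]
    congr 2
    rw [List.getD_eq_getElem _ _ hlt]
    congr 1
    omega
  unfold ltrChars
  rw [hread 1 (by omega) (by omega), Option.bind_some]
  rw [foldO cs v _ _ (fun i hi => by
    rw [PySem.List.mem_pyRange_one] at hi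
    exact hread i hi.1 hi.2)]
  rw [PySem.List.pyRange_one, show (((cs.length : Int) - 1) - 1).toNat = cs.length - 2 from by omega,
    List.foldl_map]
  rw [PySem.List.foldl_congr_mem (List.range (cs.length - 2)) _
        (fun vb k => pvStep vb (((cs.tail.dropLast).map pvDigitVal).getD k 0)) [v 1] (by
    intro acc k hk
    rw [List.mem_range] at hk
    congr 1
    rw [show ((1 : Int) + (k : Nat)) = ((k + 1 : Nat) : Int) from by push_cast; ring]
    rw [hv]
    simp only [Int.toNat_natCast]
    rw [List.getD_eq_getElem _ _ (by omega : k + 1 < cs.length),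
        List.getD_eq_getElem _ _ (by rw [List.length_map]; omega : k < ((cs.tail.dropLast).map pvDigitVal).length)]
    rw [List.getElem_map]
    congr 1
    exact (hgetin k (by omega)).symm)]
  rw [show cs.length - 2 = ((cs.tail.dropLast).map pvDigitVal).length from by simp; omega]
  rw [foldl_range_getD]
  obtain ⟨cH, iT, hcs'⟩ := List.exists_cons_of_ne_nil
    (show cs.tail.dropLast ≠ [] from by rw [← List.length_pos_iff, hlen]; omega)
  have hcr : (cs.tail.dropLast).map pvDigitVal = pvDigitVal cH :: iT.map pvDigitVal := by
    rw [hcs']; rfl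
  have hv1 : v 1 = pvDigitVal cH := by
    have h0 : cs.tail.dropLast[0]'(by rw [hlen]; omega) = cH := by
      simp [hcs']
    rw [hgetin 0 (by rw [hlen]; omega)] at h0
    rw [hv]; simp only [Int.toNat_one]
    rw [List.getD_eq_getElem _ _ (by omega : 1 < cs.length)]
    exact congrArg pvDigitVal (by simpa using h0)
  rw [hcr, hv1, List.foldl_cons, show pvStep [pvDigitVal cH] (pvDigitVal cH) = [pvDigitVal cH] from by
    rw [pvStep, PySem.List.pyGetD_neg_one (h := by simp)]
    simp]
  rw [Option.map_some, L1 (iT.map pvDigitVal) [pvDigitVal cH] (by simp)]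
  simp only [List.getLast_singleton, List.length_cons, List.length_nil]
  rw [show pvCountA (pvDigitVal cH :: iT.map pvDigitVal) = 1 + pvRecs (pvDigitVal cH) (iT.map pvDigitVal) from rfl]
  by_cases hp : ((1 + pvRecs (pvDigitVal cH) (iT.map pvDigitVal) : Nat) : Int) = p
  · simp [hp]
  · simp only [if_pos hp]
    exact congrArg some (beq_eq_false_iff_ne.mpr hp).symm

theorem pv_slice_one_neg_one {α : Type} (xs : List α) :
    PySem.List.slice xs (some 1) (some (-1)) = xs.tail.dropLast := by
  rcases xs with _ | ⟨a, t⟩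
  · rfl
  · have h : ¬((t.length : Int) < 0) := not_lt.mpr (Int.natCast_nonneg _)
    simp [PySem.List.slice, PySem.List.clampIdx, List.dropLast_eq_take, h]

theorem pv_digits_some (cs : List Char) (hd : ∀ c ∈ cs.tail.dropLast, c.isDigit) :
    pvDigits? cs = some ((cs.tail.dropLast).map pvDigitVal) := by
  unfold pvDigits?
  rw [pv_slice_one_neg_one]
  revert hd
  induction cs.tail.dropLast with
  | nil => intro _; rfl
  | cons c t ih =>
    intro hd
    have hc := hd c (List.mem_cons_self ..)
    have ht := ih (fun x hx => hd x (List.mem_cons_of_mem _ hx))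
    simp [List.mapM_cons, pv_ofChars_digit c hc, ht]

theorem pv_visible_eq (ds : List Int) (hne : ds ≠ []) :
    pvVisible ds = (pvCountA ds : Int) := by
  obtain ⟨d, t, rfl⟩ := List.exists_cons_of_ne_nil hne
  unfold pvVisible
  rw [visible_list, L2]
  rfl

theorem pv_line_eq (cs : List Char) (hok : pvLineOK cs = true) :
    ((if (cs.headD '*') ≠ '*' then
        (PySem.Int.ofChars? [cs.headD '*']).bind fun p => ltrChars cs p
      else some true)
     = (if (cs.headD '*') ≠ '*' then
        (pvDigits? cs).bind fun ds =>
        (PySem.Int.ofChars? [cs.headD '*']).map fun p => pvVisible ds == p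
      else some true))
    ∧
    ((if (cs.getLastD '*') ≠ '*' then
        (PySem.Int.ofChars? [cs.getLastD '*']).bind fun p => ltrChars cs.reverse p
      else some true)
     = (if (cs.getLastD '*') ≠ '*' then
        (pvDigits? cs).bind fun ds =>
        (PySem.Int.ofChars? [cs.getLastD '*']).map fun p => pvVisible ds.reverse == p
      else some true)) := by
  unfold pvLineOK at hok
  simp only [Bool.and_eq_true, Bool.or_eq_true, beq_iff_eq, decide_eq_true_eq,
    Bool.and_eq_true, List.all_eq_true] at hok
  rcases hok with ⟨⟨_, hh⟩, hl⟩ | ⟨⟨h3, hL⟩, hR⟩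
  · exact ⟨by rw [if_neg (fun hx => hx hh), if_neg (fun hx => hx hh)],
      by rw [if_neg (fun hx => hx hl), if_neg (fun hx => hx hl)]⟩
  have hdsne : (cs.tail.dropLast).map pvDigitVal ≠ [] := by
    simp only [ne_eq, ← List.length_eq_zero_iff]
    simp; omega
  have hrevtd : cs.reverse.tail.dropLast = (cs.tail.dropLast).reverse := by
    rw [List.tail_reverse, List.dropLast_reverse, List.tail_dropLast]
  constructor
  · by_cases hc0 : cs.headD '*' = '*'
    · rw [if_neg (fun hh => hh hc0), if_neg (fun hh => hh hc0)]
    · obtain ⟨hdig0, hall⟩ := hL.resolve_left hc0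
      rw [if_pos hc0, if_pos hc0, pv_digits_some cs hall, pv_ofChars_digit _ hdig0]
      simp only [Option.bind_some, Option.map_some]
      rw [pv_ltr_eq cs h3 hall (pvDigitVal (cs.headD '*'))]
      rw [Option.some.injEq, pv_visible_eq _ hdsne]
  · by_cases hcl : cs.getLastD '*' = '*'
    · rw [if_neg (fun hh => hh hcl), if_neg (fun hh => hh hcl)]
    · obtain ⟨hdigl, hall⟩ := hR.resolve_left hcl
      rw [if_pos hcl, if_pos hcl, pv_digits_some cs hall, pv_ofChars_digit _ hdigl]
      simp only [Option.bind_some, Option.map_some]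
      rw [pv_ltr_eq cs.reverse (by simpa using h3)
            (by rw [hrevtd]; intro c hc; exact hall c (List.mem_reverse.mp hc)) _]
      rw [Option.some.injEq, pv_visible_eq _ (by simpa using hdsne), hrevtd, List.map_reverse]

theorem pv_loop_eq (ls : List (List Char)) (h : ∀ cs ∈ ls, pvLineOK cs = true) :
    pvChvLoop ls = pvAltLoop ls := by
  induction ls with
  | nil => rfl
  | cons cs rest ih =>
    have hok := h cs (List.mem_cons_self ..)
    have hne : cs ≠ [] := by
      intro hnil
      rw [hnil, pvLineOK] at hok
      exact absurd hok (by decide)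
    have hget0 : PySem.List.pyGet? cs 0 = some (cs.headD '*') := by
      obtain ⟨c, t, rfl⟩ := List.exists_cons_of_ne_nil hne
      exact PySem.List.pyGet?_zero_cons ..
    have hgetl : PySem.List.pyGet? cs (-1) = some (cs.getLastD '*') := by
      rw [PySem.List.pyGet?_neg_one, List.getLast?_eq_some_getLast hne,
          List.getLastD_eq_getLast?, List.getLast?_eq_some_getLast hne, Option.getD_some]
    obtain ⟨hleft, hright⟩ := pv_line_eq cs hok
    show pvChvLoop (cs :: rest) = pvAltLoop (cs :: rest)
    rw [pvChvLoop, pvAltLoop, pvLineOk?, hget0, hgetl]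
    simp only [Option.bind_some]
    rw [← hleft, ← hright]
    cases h1 : (if (cs.headD '*') ≠ '*' then
        (PySem.Int.ofChars? [cs.headD '*']).bind fun p => ltrChars cs p
      else some true) with
    | none => rfl
    | some ok1 =>
      simp only [Option.bind_some]
      cases ok1 with
      | false => simp
      | true =>
        rw [if_pos rfl]
        cases h2 : (if (cs.getLastD '*') ≠ '*' then
            (PySem.Int.ofChars? [cs.getLastD '*']).bind fun p => ltrChars cs.reverse p
          else some true) with
        | none => rfl
        | some ok2 =>
          simp only [Option.bind_some]
          cases ok2 with
          | false => simp
          | true =>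
            rw [if_pos rfl, if_pos rfl]
            exact ih (fun x hx => h x (List.mem_cons_of_mem _ hx))

-- ===== VERDICT (by name: the statement is the Claim_ definition above) =====
theorem check_horizontal_visibility_spec : Claim_equal_check_horizontal_visibility := by
  intro board _hdom hpre
  unfold Spec_check_horizontal_visibility
  unfold check_horizontal_visibility check_horizontal_visibility_alt
  rw [pv_slice_one_neg_one, pv_loop_eq]
  intro cs hcs
  rw [List.mem_map] at hcs
  obtain ⟨line, hline, rfl⟩ := hcs
  unfold Pre_check_horizontal_visibility at hpre
  rw [List.all_eq_true] at hpre
  exact hpre line hline
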